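-- pv_equiv track=rewrite | github.com/fkilld/dsa-450 | search_and_sort/23.py | get_height
-- ===== SOURCE A (Python) =====
-- def get_height(arr, n, m):
--     """
--     Find maximum sawblade height that gives at least m meters of wood.
--
--     Args:
--         arr: Array of tree heights
--         n: Number of trees
--         m: Required meters of wood
--
--     Returns:
--         Maximum sawblade height
--     """
--     arr.sort()
--
--     # Binary search bounds
--     lb = 0  # Minimum possible height
--     ub = arr[-1]  # Maximum tree height
--     ans = 0
--
--     while lb <= ub:
--         mid = (lb + ub) // 2
--
--         # Calculate wood collected if sawblade at height mid
--         total_cut = 0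
--         for h in range(n):
--             if arr[h] > mid:
--                 total_cut += arr[h] - mid
--
--         # Check if we get enough wood
--         if total_cut >= m:
--             ans = mid  # This height works
--             lb = mid + 1  # Try higher sawblade (less wood, but maybe still enough)
--         else:
--             ub = mid - 1  # Need more wood, lower the blade
--
--     return ans
-- ===== SOURCE B (Python) =====
-- def get_height(arr, n, m):
--     """Max sawblade height giving >= m wood: binary search on the height,
--     each feasibility check answered from a precomputed suffix-sum table
--     via a bisection on the sorted tree heights (no rescan of all trees).
--     Does not mutate arr (A sorts it in place); return value is the same."""
--     s = sorted(arr)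
--     t = s[:max(n, 0)]   # first n trees; a negative count means none
--     k = len(t)
--     suf = [0] * (k + 1)
--     for i in range(k - 1, -1, -1):
--         suf[i] = suf[i + 1] + t[i]
--
--     def wood(h):
--         # hand-written bisect_right (no imports available): first index with t[idx] > h
--         lo, hi = 0, k
--         while lo < hi:
--             mid = (lo + hi) // 2
--             if h < t[mid]:
--                 hi = mid
--             else:
--                 lo = mid + 1
--         return suf[lo] - h * (k - lo)
--
--     lb, ub, ans = 0, s[-1], 0
--     while lb <= ub:
--         mid = (lb + ub) // 2
--         if wood(mid) >= m:
--             ans = mid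
--             lb = mid + 1
--         else:
--             ub = mid - 1
--     return ans
-- ===== Notes on version B (the rewrite author's own statement) =====
-- stated objective: alternative
-- what changed: Each feasibility check of the binary search is answered from a precomputed suffix-sum table via a bisection on the sorted heights instead of A's full rescan of all trees; B also does not mutate arr (A sorts it in place).
import Mathlib
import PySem

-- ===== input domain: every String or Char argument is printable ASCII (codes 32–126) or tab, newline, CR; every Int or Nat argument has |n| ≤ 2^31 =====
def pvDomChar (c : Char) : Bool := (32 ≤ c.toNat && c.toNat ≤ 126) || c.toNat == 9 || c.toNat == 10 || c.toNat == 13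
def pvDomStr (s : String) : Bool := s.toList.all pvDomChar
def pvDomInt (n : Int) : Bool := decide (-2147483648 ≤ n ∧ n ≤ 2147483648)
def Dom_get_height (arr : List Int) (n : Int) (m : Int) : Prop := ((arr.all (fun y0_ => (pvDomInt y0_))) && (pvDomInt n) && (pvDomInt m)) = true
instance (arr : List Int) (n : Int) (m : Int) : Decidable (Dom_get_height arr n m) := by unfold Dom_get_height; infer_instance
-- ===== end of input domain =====

-- B answers each binary-search feasibility check from a precomputed suffix-sum table via a bisection
-- on the sorted heights instead of rescanning all trees; equivalence is about the RETURN value only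
-- (A sorts arr in place, B does not mutate it).

-- ===== PORT A =====
-- inner 'for h in range(n): if arr[h] > mid: total_cut += arr[h] - mid'
def pvCutA (s : List Int) (n : Int) (mid : Int) : Int :=
  (PySem.List.pyRange 0 n 1).foldl
    (fun total_cut h =>
      if PySem.List.pyGetD s h 0 > mid then total_cut + (PySem.List.pyGetD s h 0 - mid)
      else total_cut) 0

-- the 'while lb <= ub' binary search of A; fuel = the initial interval length, a pure
-- totality guard (the interval shrinks every iteration, so the while-test exits first)
def pvLoopA (s : List Int) (n : Int) (m : Int) : Nat → Int → Int → Int → Int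
  | 0, _, _, ans => ans
  | fuel + 1, lb, ub, ans =>
    if lb ≤ ub then
      let mid := PySem.Int.floordiv (lb + ub) 2
      if pvCutA s n mid ≥ m then pvLoopA s n m fuel (mid + 1) ub mid
      else pvLoopA s n m fuel lb (mid - 1) ans
    else ans

def get_height (arr : List Int) (n : Int) (m : Int) : Int :=
  let s := PySem.List.sorted arr (fun x => x)   -- arr.sort()
  -- arr[-1]: Python raises IndexError on [], excluded by Pre_
  let ub := PySem.List.pyGetD s (-1) 0
  pvLoopA s n m (ub + 1).toNat 0 ub 0

-- ===== PORT B =====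
-- 'suf = [0]*(k+1); for i in range(k-1,-1,-1): suf[i] = suf[i+1] + t[i]'  (right-to-left fill)
def pvSuf (t : List Int) : List Int :=
  t.foldr (fun x acc => (x + acc.headD 0) :: acc) [0]

-- 'def wood(h)': hand-written bisect_right loop of Source B = CPython's bisect_right = PySem.List.bisectRight
def pvWoodB (t : List Int) (suf : List Int) (k : Int) (h : Int) : Int :=
  let lo : Nat := PySem.List.bisectRight t h
  PySem.List.pyGetD suf (lo : Int) 0 - h * (k - (lo : Int))

-- the 'while lb <= ub' binary search of B; same fuel totality guard as A's loop
def pvLoopB (t suf : List Int) (k : Int) (m : Int) : Nat → Int → Int → Int → Int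
  | 0, _, _, ans => ans
  | fuel + 1, lb, ub, ans =>
    if lb ≤ ub then
      let mid := PySem.Int.floordiv (lb + ub) 2
      if pvWoodB t suf k mid ≥ m then pvLoopB t suf k m fuel (mid + 1) ub mid
      else pvLoopB t suf k m fuel lb (mid - 1) ans
    else ans

def get_height_alt (arr : List Int) (n : Int) (m : Int) : Int :=
  let s := PySem.List.sorted arr (fun x => x)   -- sorted(arr)
  let t := PySem.List.slice s none (some (max n 0))   -- s[:max(n, 0)]
  let k := PySem.List.len t
  let suf := pvSuf t
  let ub := PySem.List.pyGetD s (-1) 0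
  pvLoopB t suf k m (ub + 1).toNat 0 ub 0

-- ===== PRECONDITION & SPEC =====
-- Pre_ excludes exactly the inputs where Python A raises: arr = [] (IndexError on arr[-1]), and
-- n > len(arr) with some nonnegative height (IndexError in the rescan; if every height is negative
-- the loop body never runs, so that case stays inside Pre_).
def Pre_get_height (arr : List Int) (n : Int) (m : Int) : Prop :=
  arr ≠ [] ∧ (n ≤ (arr.length : Int) ∨ ∀ x ∈ arr, x < 0)
instance (arr : List Int) (n : Int) (m : Int) : Decidable (Pre_get_height arr n m) := by
  unfold Pre_get_height; infer_instance

def pvWitness_get_height : List Int × Int × Int := ([2, 5], 2, 3)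

def Spec_get_height (arr : List Int) (n : Int) (m : Int) (out : Int) : Prop := out = get_height_alt arr n m
instance (arr : List Int) (n : Int) (m : Int) (out : Int) : Decidable (Spec_get_height arr n m out) := by
  unfold Spec_get_height; infer_instance

-- ===== CLAIM (what is proved, stated in full; the proofs are below) =====
def Claim_equal_get_height : Prop := ∀ (arr : List Int) (n : Int) (m : Int), Dom_get_height arr n m → Pre_get_height arr n m → Spec_get_height arr n m (get_height arr n m)

-- ===== LEMMAS AND PROOFS =====

-- suffix-sum table: suf.getD i 0 is the sum of t.drop i
lemma pvSuf_headD (t : List Int) : (pvSuf t).headD 0 = t.sum := by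
  induction t with
  | nil => simp [pvSuf]
  | cons x t ih => simp [pvSuf] at ih ⊢; omega

lemma pvSuf_getD (t : List Int) (i : Nat) (hi : i ≤ t.length) :
    (pvSuf t).getD i 0 = (t.drop i).sum := by
  induction t generalizing i with
  | nil =>
    obtain rfl : i = 0 := Nat.le_zero.mp hi
    simp [pvSuf]
  | cons x t ih =>
    cases i with
    | zero => simpa [pvSuf] using pvSuf_headD t
    | succ j => simpa [pvSuf] using ih j (by simpa using hi)

-- A's rescan body skips every element ≤ mid …
lemma pvFold_skip (u : List Int) (mid acc : Int) (hu : ∀ x ∈ u, x ≤ mid) :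
    u.foldl (fun a x => if x > mid then a + (x - mid) else a) acc = acc := by
  induction u generalizing acc with
  | nil => rfl
  | cons y u ih =>
    have hy := hu y (by simp)
    simp only [List.foldl, if_neg (by omega : ¬ y > mid)]
    exact ih acc (fun x hx => hu x (List.mem_cons_of_mem _ hx))

-- … and adds x - mid for every element > mid
lemma pvFold_take (v : List Int) (mid acc : Int) (hv : ∀ x ∈ v, mid < x) :
    v.foldl (fun a x => if x > mid then a + (x - mid) else a) acc
      = acc + v.sum - mid * v.length := by
  induction v generalizing acc with
  | nil => simp
  | cons y v ih =>
    have hy := hv y (by simp)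
    simp only [List.foldl, if_pos (by omega : y > mid)]
    rw [ih (acc + (y - mid)) (fun x hx => hv x (List.mem_cons_of_mem _ hx))]
    simp only [List.sum_cons, List.length_cons]
    push_cast
    ring

-- the key step: A's rescan equals B's suffix-sum + bisection check, for every blade height
lemma pvCheck_eq (s : List Int) (n mid : Int)
    (hs : List.Pairwise (· ≤ ·) s) (hn : n ≤ (s.length : Int)) :
    pvCutA s n mid
      = pvWoodB (PySem.List.slice s none (some (max n 0)))
          (pvSuf (PySem.List.slice s none (some (max n 0))))
          (PySem.List.len (PySem.List.slice s none (some (max n 0)))) mid := by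
  rw [PySem.List.slice_to s (le_max_right n 0)]
  set t := s.take (max n 0).toNat with ht
  have hts : t.Pairwise (· ≤ ·) := List.Pairwise.sublist (List.take_sublist _ _) hs
  have hlen : t.length = n.toNat := by rw [ht, List.length_take]; omega
  have hrange : PySem.List.pyRange 0 n 1 = PySem.List.pyRange 0 (PySem.List.len t) 1 := by
    have : PySem.List.len t = max n 0 := by simp [PySem.List.len, hlen]
    rw [this]
    by_cases h : 0 ≤ n
    · rw [max_eq_left h]
    · rw [max_eq_right (by omega : n ≤ 0), PySem.List.pyRange_one_eq_nil (by omega),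
          PySem.List.pyRange_one_eq_nil (by omega)]
  obtain ⟨hrle, hlo, hhi⟩ := PySem.List.bisectRight_spec t mid hts
  set r := PySem.List.bisectRight t mid with hr
  -- A's rescan over indices 0..n-1 of s is a fold over the elements of t = s[:n]
  have step1 : pvCutA s n mid
      = t.foldl (fun a x => if x > mid then a + (x - mid) else a) 0 := by
    unfold pvCutA
    rw [PySem.List.foldl_congr_mem _ _
      (fun total_cut h => if PySem.List.pyGetD t h 0 > mid
        then total_cut + (PySem.List.pyGetD t h 0 - mid) else total_cut) _
      (by
        intro acc j hj
        have hj' := (PySem.List.mem_pyRange_one).mp hj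
        have hget : PySem.List.pyGetD s j 0 = PySem.List.pyGetD t j 0 := by
          rw [PySem.List.pyGetD_eq_getElem s 0 hj'.1 (by omega),
              PySem.List.pyGetD_eq_getElem t 0 hj'.1 (by rw [hlen]; omega)]
          simp [ht]
        simp only [hget])]
    rw [hrange]
    exact PySem.List.foldl_pyRange_zero_pyGetD t 0
      (fun a x => if x > mid then a + (x - mid) else a) 0
  -- split the fold at the bisection point r
  have hsplit : t.foldl (fun a x => if x > mid then a + (x - mid) else a) 0
      = (t.drop r).sum - mid * ((t.drop r).length : Int) := by
    conv_lhs => rw [← List.take_append_drop r t]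
    rw [List.foldl_append]
    rw [pvFold_skip (t.take r) mid 0 (by
      intro x hx
      obtain ⟨j, hjlt, rfl⟩ := List.getElem_of_mem hx
      rw [List.getElem_take]
      exact hlo j (by simp at hjlt; omega) (by simp at hjlt; omega))]
    rw [pvFold_take (t.drop r) mid 0 (by
      intro x hx
      obtain ⟨j, hjlt, rfl⟩ := List.getElem_of_mem hx
      rw [List.getElem_drop]
      exact hhi (r + j) (by simp at hjlt; omega) (by omega))]
    ring
  rw [step1, hsplit]
  simp only [pvWoodB, ← hr]
  rw [PySem.List.pyGetD_natCast, pvSuf_getD t r hrle]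
  have hdl : ((t.drop r).length : Int) = (t.length : Int) - (r : Int) := by
    rw [List.length_drop]; omega
  have hlt : PySem.List.len t = (t.length : Int) := by simp [PySem.List.len]
  rw [hdl, hlt]

-- both binary searches coincide once the per-height checks agree
lemma pvLoop_eq (s t suf : List Int) (n k m : Int)
    (hcheck : ∀ mid, pvCutA s n mid = pvWoodB t suf k mid)
    (fuel : Nat) (lb ub ans : Int) :
    pvLoopA s n m fuel lb ub ans = pvLoopB t suf k m fuel lb ub ans := by
  induction fuel generalizing lb ub ans with
  | zero => rfl
  | succ fuel ih =>
    simp only [pvLoopA, pvLoopB, hcheck]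
    split
    · split
      · exact ih _ _ _
      · exact ih _ _ _
    · rfl

-- ===== VERDICT (by name: the statement is the Claim_ definition above) =====
theorem get_height_spec : Claim_equal_get_height := by
  intro arr n m _ hpre
  obtain ⟨hne, hcase⟩ := hpre
  unfold Spec_get_height get_height get_height_alt
  show pvLoopA (PySem.List.sorted arr (fun x => x)) n m
      ((PySem.List.pyGetD (PySem.List.sorted arr (fun x => x)) (-1) 0) + 1).toNat 0
      (PySem.List.pyGetD (PySem.List.sorted arr (fun x => x)) (-1) 0) 0
    = pvLoopB (PySem.List.slice (PySem.List.sorted arr (fun x => x)) none (some (max n 0)))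
        (pvSuf (PySem.List.slice (PySem.List.sorted arr (fun x => x)) none (some (max n 0))))
        (PySem.List.len (PySem.List.slice (PySem.List.sorted arr (fun x => x)) none (some (max n 0)))) m
        ((PySem.List.pyGetD (PySem.List.sorted arr (fun x => x)) (-1) 0) + 1).toNat 0
        (PySem.List.pyGetD (PySem.List.sorted arr (fun x => x)) (-1) 0) 0
  set s := PySem.List.sorted arr (fun x => x) with hsdef
  have hperm : s.Perm arr := by
    rw [hsdef]; exact PySem.List.sorted_perm arr (fun x => x) false
  have hsne : s ≠ [] := by
    intro h
    rw [h] at hperm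
    exact hne (List.perm_nil.mp hperm.symm)
  have hslen : s.length = arr.length := hperm.length_eq
  have hpair : s.Pairwise (· ≤ ·) := PySem.List.sorted_pairwise arr (fun x => x)
  by_cases hn : n ≤ (s.length : Int)
  · exact pvLoop_eq s _ _ n _ m
      (fun mid => pvCheck_eq s n mid hpair hn) _ _ _ _
  · have hneg : ∀ x ∈ arr, x < 0 := by
      rcases hcase with h | h
      · exact absurd (by omega : n ≤ (s.length : Int)) hn
      · exact h
    have hub : PySem.List.pyGetD s (-1) 0 < 0 := by
      rw [PySem.List.pyGetD_neg_one s 0 hsne]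
      exact hneg _ (hperm.subset (List.getLast_mem hsne))
    have hfuel : (PySem.List.pyGetD s (-1) 0 + 1).toNat = 0 := by omega
    rw [hfuel]
    rfl
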